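-- pv_equiv track=rewrite | github.com/Paras-Minfy/Python-Assignment | tuple_solutions.py | count_coordinate_occurrences
-- ===== SOURCE A (Python) =====
-- def count_coordinate_occurrences(coords):
--     count = {}
--     for coord in coords:
--         if coord in count:
--             count[coord] += 1
--         else:
--             count[coord] = 1
--     return count
-- ===== SOURCE B (Python) =====
-- def count_coordinate_occurrences(coords):
--     return {coord: coords.count(coord) for coord in dict.fromkeys(coords)}
-- ===== Notes on version B (the rewrite author's own statement) =====
-- stated objective: idiomatic
-- what changed: Replaces the hand-rolled membership-test-and-increment dict loop with a dict comprehension over the first occurrences (dict.fromkeys) that counts each key once with list.count.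
import Mathlib
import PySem

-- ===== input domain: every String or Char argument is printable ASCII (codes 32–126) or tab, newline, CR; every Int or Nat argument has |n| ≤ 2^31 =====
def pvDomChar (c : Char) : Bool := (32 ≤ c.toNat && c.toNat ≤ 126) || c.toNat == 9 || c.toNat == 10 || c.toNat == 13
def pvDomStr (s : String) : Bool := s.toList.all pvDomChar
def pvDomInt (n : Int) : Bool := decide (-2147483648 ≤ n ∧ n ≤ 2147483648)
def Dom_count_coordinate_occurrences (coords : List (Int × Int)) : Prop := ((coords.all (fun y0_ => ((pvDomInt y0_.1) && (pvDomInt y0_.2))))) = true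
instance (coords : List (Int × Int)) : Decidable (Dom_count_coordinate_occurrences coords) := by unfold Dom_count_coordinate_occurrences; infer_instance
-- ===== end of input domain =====

-- ===== PORT A =====
-- count = {}; for coord in coords: if coord in count: count[coord] += 1 else: count[coord] = 1; return count
def count_coordinate_occurrences (coords : List (Int × Int)) : List (Int × Int × Int) :=
  ((coords.foldl
      (fun (d : PySem.Dict (Int × Int) Int) c =>
        if d.contains c then d.insert c (d.getD c 0 + 1) else d.insert c 1)
      PySem.Dict.empty).items).map (fun p => (p.1.1, p.1.2, p.2))

-- ===== PORT B =====
-- return {coord: coords.count(coord) for coord in dict.fromkeys(coords)}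
def count_coordinate_occurrences_alt (coords : List (Int × Int)) : List (Int × Int × Int) :=
  (PySem.List.dedup coords).map (fun k => (k.1, k.2, PySem.List.count coords k))

-- ===== PRECONDITION & SPEC =====
def Spec_count_coordinate_occurrences (coords : List (Int × Int)) (out : List (Int × Int × Int)) : Prop := out = count_coordinate_occurrences_alt coords
instance (coords : List (Int × Int)) (out : List (Int × Int × Int)) : Decidable (Spec_count_coordinate_occurrences coords out) := by unfold Spec_count_coordinate_occurrences; infer_instance

-- ===== CLAIM (what is proved, stated in full; the proofs are below) =====
def Claim_equal_count_coordinate_occurrences : Prop := ∀ (coords : List (Int × Int)), Dom_count_coordinate_occurrences coords → Spec_count_coordinate_occurrences coords (count_coordinate_occurrences coords)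

-- ===== LEMMAS AND PROOFS =====

-- ===== VERDICT (by name: the statement is the Claim_ definition above) =====
-- A's branching fold body IS the unconditional counter step (absent key has getD 0)
lemma body_eq : (fun (d : PySem.Dict (Int × Int) Int) c =>
      if d.contains c then d.insert c (d.getD c 0 + 1) else d.insert c 1)
    = (fun (d : PySem.Dict (Int × Int) Int) c => d.insert c (d.getD c 0 + 1)) := by
  funext d c
  by_cases h : d.contains c = true
  · simp [h]
  · simp [eq_false_of_ne_true h, PySem.Dict.getD_of_not_contains (h := eq_false_of_ne_true h)]

theorem count_coordinate_occurrences_spec : Claim_equal_count_coordinate_occurrences := by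
  intro coords _
  unfold Spec_count_coordinate_occurrences count_coordinate_occurrences count_coordinate_occurrences_alt
  rw [body_eq, PySem.Dict.foldl_insert_getD_add_one_eq_counter, PySem.Dict.items_counter]
  simp [PySem.List.count_eq, Function.comp]
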